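-- pv_equiv track=rewrite | github.com/fenggit/WallpaperTools | skills/wallpaper-download-brand-skill/scripts/collect_brand_sources.py | source_status
-- ===== SOURCE A (Python) =====
-- from typing import List, Sequence
--
-- def source_status(links: Sequence[str]) -> str:
--     if any("drive.google.com" in url for url in links):
--         return "has_drive_link"
--     if any("photos.app.goo.gl" in url or "photos.google.com" in url for url in links):
--         return "has_google_photos_link"
--     if links:
--         return "has_other_source_link"
--     return "no_source_link"
-- ===== SOURCE B (Python) =====
-- _STATUSES = ("has_other_source_link", "has_google_photos_link", "has_drive_link")
--
-- def _rank(url):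
--     if "drive.google.com" in url:
--         return 2
--     if "photos.app.goo.gl" in url or "photos.google.com" in url:
--         return 1
--     return 0
--
-- def source_status(links):
--     if not links:
--         return "no_source_link"
--     return _STATUSES[max(_rank(url) for url in links)]
-- ===== Notes on version B (the rewrite author's own statement) =====
-- stated objective: alternative
-- what changed: Replaces the three prioritized short-circuit any() substring scans with a score-and-reduce scheme: each link is mapped to a numeric priority rank, the maximum rank is taken, and the status is read from a lookup table indexed by that rank.
import Mathlib
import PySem

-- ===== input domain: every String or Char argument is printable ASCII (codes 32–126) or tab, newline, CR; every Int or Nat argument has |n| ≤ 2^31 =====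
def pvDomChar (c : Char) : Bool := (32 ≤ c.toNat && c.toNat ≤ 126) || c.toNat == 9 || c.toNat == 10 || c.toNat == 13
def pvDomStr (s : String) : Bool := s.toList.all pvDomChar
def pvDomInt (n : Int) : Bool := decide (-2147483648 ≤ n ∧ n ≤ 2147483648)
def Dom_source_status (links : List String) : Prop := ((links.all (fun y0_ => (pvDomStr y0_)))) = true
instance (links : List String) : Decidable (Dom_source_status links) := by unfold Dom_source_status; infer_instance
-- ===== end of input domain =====

-- B replaces A's three prioritized short-circuit any() scans with a score-and-reduce
-- scheme: map each link to a numeric rank, take the maximum, index a status table.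

-- ===== PORT A =====
def source_status (links : List String) : String :=
  if links.any (fun url => PySem.Str.isIn "drive.google.com" url) then
    "has_drive_link"
  else if links.any (fun url =>
      PySem.Str.isIn "photos.app.goo.gl" url || PySem.Str.isIn "photos.google.com" url) then
    "has_google_photos_link"
  else if links ≠ [] then
    "has_other_source_link"
  else
    "no_source_link"

-- ===== PORT B =====
def pvStatuses : List String :=
  ["has_other_source_link", "has_google_photos_link", "has_drive_link"]

def pvRank (url : String) : Int :=
  if PySem.Str.isIn "drive.google.com" url then 2
  else if PySem.Str.isIn "photos.app.goo.gl" url || PySem.Str.isIn "photos.google.com" url then 1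
  else 0

def source_status_alt (links : List String) : String :=
  if links = [] then "no_source_link"
  else
    -- max(gen) = PySem.List.max? with identity key; _STATUSES[i] = pyGet? (in range here)
    ((PySem.List.max? (links.map pvRank) (fun r => r)).bind
      (fun best => PySem.List.pyGet? pvStatuses best)).getD ""

-- ===== PRECONDITION & SPEC =====
def Spec_source_status (links : List String) (out : String) : Prop := out = source_status_alt links
instance (links : List String) (out : String) : Decidable (Spec_source_status links out) := by unfold Spec_source_status; infer_instance

-- ===== CLAIM (what is proved, stated in full; the proofs are below) =====
def Claim_equal_source_status : Prop := ∀ (links : List String), Dom_source_status links → Spec_source_status links (source_status links)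

-- ===== LEMMAS AND PROOFS =====

-- ===== VERDICT (by name: the statement is the Claim_ definition above) =====
-- ranks lie in {0,2}∪{1}
theorem pvRank_bounds (u : String) : 0 ≤ pvRank u ∧ pvRank u ≤ 2 := by
  unfold pvRank; split_ifs <;> omega

-- running max of ranks, characterized by the two any-scans (ranks are in {0,1,2})
theorem pv_foldl_max_rank (xs : List String) (a : Int) (ha : 0 ≤ a) (ha2 : a ≤ 2) :
    (xs.map pvRank).foldl max a =
      if xs.any (fun url => PySem.Str.isIn "drive.google.com" url) then 2
      else if xs.any (fun url =>
          PySem.Str.isIn "photos.app.goo.gl" url || PySem.Str.isIn "photos.google.com" url) then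
        max a 1
      else a := by
  induction xs generalizing a with
  | nil => simp
  | cons x xs ih =>
    simp only [List.map_cons, List.foldl_cons, List.any_cons]
    rw [ih (max a (pvRank x)) (le_max_of_le_left ha)
      (max_le ha2 (pvRank_bounds x).2)]
    by_cases hd : PySem.Str.isIn "drive.google.com" x = true <;>
    by_cases hp : (PySem.Str.isIn "photos.app.goo.gl" x ||
        PySem.Str.isIn "photos.google.com" x) = true <;>
    simp only [pvRank, hd, hp, Bool.true_or, Bool.false_or] <;>
    split_ifs <;> simp_all

theorem pvM2 : max (2 : Int) 1 = 2 := by norm_num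
theorem pvM1 : max (1 : Int) 1 = 1 := by norm_num
theorem pvM0 : max (0 : Int) 1 = 1 := by norm_num

theorem pvG0 : PySem.List.pyGet? pvStatuses 0 = some "has_other_source_link" := by decide
theorem pvG1 : PySem.List.pyGet? pvStatuses 1 = some "has_google_photos_link" := by decide
theorem pvG2 : PySem.List.pyGet? pvStatuses 2 = some "has_drive_link" := by decide

theorem source_status_spec : Claim_equal_source_status := by
  intro links _
  unfold Spec_source_status source_status source_status_alt
  cases links with
  | nil => simp
  | cons x xs =>
    simp only [List.map_cons, PySem.List.max?_id_cons,
      pv_foldl_max_rank xs (pvRank x) (pvRank_bounds x).1 (pvRank_bounds x).2]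
    by_cases hd : PySem.Str.isIn "drive.google.com" x = true <;>
    by_cases hp : (PySem.Str.isIn "photos.app.goo.gl" x ||
        PySem.Str.isIn "photos.google.com" x) = true <;>
    by_cases hda : (xs.any fun url => PySem.Str.isIn "drive.google.com" url) = true <;>
    by_cases hpa : (xs.any fun url => PySem.Str.isIn "photos.app.goo.gl" url ||
        PySem.Str.isIn "photos.google.com" url) = true <;>
    simp only [List.any_cons, hd, hp, hda, hpa,
      Bool.or_true, Bool.or_false, pvRank, if_true, if_false, reduceCtorEq,
      pvM0, pvM1, pvM2, ne_eq, List.cons_ne_nil, not_false_eq_true, Option.bind, pvG0, pvG1, pvG2, Option.getD_some]
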